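-- pv_equiv track=rewrite | github.com/ivanyu199012/testPractice | complain_result.py | get_answer_by
-- ===== SOURCE A (Python) =====
-- def get_answer_by(id_list, staff_2_target_set_dict, complaint_success_id_list ):
-- 	answer = []
-- 	for id in id_list:
-- 		if not id in staff_2_target_set_dict:
-- 			answer.append( 0 )
-- 			continue
--
-- 		valid_complain_count = 0
-- 		for complaint_success_id in complaint_success_id_list:
-- 			if complaint_success_id in staff_2_target_set_dict[ id ]:
-- 				valid_complain_count += 1
-- 		answer.append( valid_complain_count )
-- 	return answer
-- ===== SOURCE B (Python) =====
-- def get_answer_by(id_list, staff_2_target_set_dict, complaint_success_id_list):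
--     # Count each complaint id once, then for every staff answer by summing the
--     # counter over the distinct members of that staff's target set.
--     cnt = {}
--     for c in complaint_success_id_list:
--         cnt[c] = cnt.get(c, 0) + 1
--     answer = []
--     for id in id_list:
--         if id in staff_2_target_set_dict:
--             answer.append(sum(cnt.get(x, 0) for x in set(staff_2_target_set_dict[id])))
--         else:
--             answer.append(0)
--     return answer
-- ===== Notes on version B (the rewrite author's own statement) =====
-- stated objective: faster
-- what changed: B builds a counter of the complaint list once and answers each staff by summing the counter over the distinct elements of its target set, removing A's inner scan of the whole complaint list per staff.
import Mathlib
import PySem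

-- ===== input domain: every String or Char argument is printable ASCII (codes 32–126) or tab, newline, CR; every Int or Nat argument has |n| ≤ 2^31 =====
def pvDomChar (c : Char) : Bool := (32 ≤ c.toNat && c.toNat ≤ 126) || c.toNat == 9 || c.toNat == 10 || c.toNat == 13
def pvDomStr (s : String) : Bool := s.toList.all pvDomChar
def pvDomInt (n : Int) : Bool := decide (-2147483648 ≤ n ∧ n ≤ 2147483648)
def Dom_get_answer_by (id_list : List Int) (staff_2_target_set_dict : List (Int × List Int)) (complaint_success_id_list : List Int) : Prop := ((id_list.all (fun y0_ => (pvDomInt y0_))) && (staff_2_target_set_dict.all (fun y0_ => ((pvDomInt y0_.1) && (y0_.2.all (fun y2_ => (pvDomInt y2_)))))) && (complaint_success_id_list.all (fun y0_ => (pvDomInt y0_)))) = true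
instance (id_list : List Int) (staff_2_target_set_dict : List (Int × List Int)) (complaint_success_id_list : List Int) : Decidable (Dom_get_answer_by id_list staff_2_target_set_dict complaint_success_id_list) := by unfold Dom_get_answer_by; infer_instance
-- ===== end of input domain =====

-- B replaces A's per-staff scan of the whole complaint list with a counter of the
-- complaint list built once, summed over the distinct elements of each target set.

-- ===== PORT A =====
-- A: for each id, append 0 if id not a key, else count complaints that are in the target set.
def get_answer_by (id_list : List Int) (staff_2_target_set_dict : List (Int × List Int)) (complaint_success_id_list : List Int) : List Int :=
  id_list.foldl (fun answer id =>
    match (PySem.Dict.mk staff_2_target_set_dict).get? id with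
    | none => answer ++ [0]
    | some target =>
        answer ++ [complaint_success_id_list.foldl
          (fun cnt c => if c ∈ target then cnt + 1 else cnt) (0 : Int)]) []

-- ===== PORT B =====
-- B: counter of the complaint list; per id, sum counter over the distinct target elements.
def get_answer_by_alt (id_list : List Int) (staff_2_target_set_dict : List (Int × List Int)) (complaint_success_id_list : List Int) : List Int :=
  let cnt := complaint_success_id_list.foldl
    (fun d c => d.insert c (d.getD c 0 + 1)) (PySem.Dict.empty (κ := Int) (ν := Int))
  id_list.map (fun id =>
    match (PySem.Dict.mk staff_2_target_set_dict).get? id with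
    | none => 0
    | some target => ((PySem.Set.ofList target).map (fun x => cnt.getD x 0)).sum)

-- ===== PRECONDITION & SPEC =====
def Spec_get_answer_by (id_list : List Int) (staff_2_target_set_dict : List (Int × List Int)) (complaint_success_id_list : List Int) (out : List Int) : Prop := out = get_answer_by_alt id_list staff_2_target_set_dict complaint_success_id_list
instance (id_list : List Int) (staff_2_target_set_dict : List (Int × List Int)) (complaint_success_id_list : List Int) (out : List Int) : Decidable (Spec_get_answer_by id_list staff_2_target_set_dict complaint_success_id_list out) := by unfold Spec_get_answer_by; infer_instance

-- ===== CLAIM (what is proved, stated in full; the proofs are below) =====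
def Claim_equal_get_answer_by : Prop := ∀ (id_list : List Int) (staff_2_target_set_dict : List (Int × List Int)) (complaint_success_id_list : List Int), Dom_get_answer_by id_list staff_2_target_set_dict complaint_success_id_list → Spec_get_answer_by id_list staff_2_target_set_dict complaint_success_id_list (get_answer_by id_list staff_2_target_set_dict complaint_success_id_list)

-- ===== LEMMAS AND PROOFS =====

-- On a duplicate-free list s, summing "count of x in comps" over x ∈ s
-- equals the number of elements of comps that lie in s.
lemma sum_count_nodup (s comps : List Int) (hnd : s.Nodup) :
    (s.map (fun x => (comps.count x : Int))).sum
      = (comps.countP (fun c => decide (c ∈ s)) : Int) := by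
  induction comps with
  | nil => simp
  | cons c cs ih =>
    have hcount : ∀ x : Int, ((c :: cs).count x : Int)
        = (cs.count x : Int) + (if x = c then 1 else 0) := by
      intro x
      rw [List.count_cons]
      push_cast
      by_cases h : x = c
      · subst h; simp
      · simp [h, Ne.symm h]
    have hsum : (s.map (fun x => ((c :: cs).count x : Int))).sum
        = (s.map (fun x => (cs.count x : Int))).sum
          + (s.map (fun x => if x = c then (1 : Int) else 0)).sum := by
      rw [← PySem.List.sum_map_add_int]
      exact congrArg List.sum (List.map_congr_left (fun x _ => hcount x))
    have hbool : (s.map (fun x => if x = c then (1 : Int) else 0))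
        = (s.map (fun x => if (x == c) = true then (1 : Int) else 0)) :=
      List.map_congr_left (fun x _ => by simp)
    have hone : (s.map (fun x => if x = c then (1 : Int) else 0)).sum
        = if c ∈ s then 1 else 0 := by
      rw [hbool, PySem.List.sum_map_ite_one_zero]
      have hcp : s.countP (fun x => x == c) = s.count c := List.count_eq_countP.symm
      by_cases h : c ∈ s
      · rw [hcp, List.count_eq_one_of_mem hnd h]; simp [h]
      · rw [hcp, List.count_eq_zero_of_not_mem h]; simp [h]
    rw [hsum, ih, hone, List.countP_cons]
    by_cases h : c ∈ s <;> simp [h]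

-- A's inner counting loop equals B's counter sum over the distinct target elements.
lemma inner_eq (target comps : List Int) :
    comps.foldl (fun cnt c => if c ∈ target then cnt + 1 else cnt) (0 : Int)
      = ((PySem.Set.ofList target).map
          (fun x => (comps.foldl (fun d c => d.insert c (d.getD c 0 + 1))
            (PySem.Dict.empty (κ := Int) (ν := Int))).getD x 0)).sum := by
  have hmap : ((PySem.Set.ofList target).map
      (fun x => (comps.foldl (fun d c => d.insert c (d.getD c 0 + 1))
        (PySem.Dict.empty (κ := Int) (ν := Int))).getD x 0))
      = ((PySem.Set.ofList target).map (fun x => (comps.count x : Int))) :=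
    List.map_congr_left (fun x _ => by
      rw [PySem.Dict.foldl_insert_getD_add_one_eq_counter, PySem.Dict.getD_counter])
  rw [hmap, sum_count_nodup _ _ (PySem.Set.nodup_ofList target)]
  have hcp : comps.countP (fun c => decide (c ∈ PySem.Set.ofList target))
      = comps.countP (fun c => decide (c ∈ target)) :=
    List.countP_congr (fun c _ => by simp [PySem.Set.mem_ofList])
  rw [hcp]
  simpa using PySem.List.foldl_count_if (fun c => decide (c ∈ target)) comps 0

-- ===== VERDICT (by name: the statement is the Claim_ definition above) =====
theorem get_answer_by_spec : Claim_equal_get_answer_by := by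
  intro id_list d comps _
  unfold Spec_get_answer_by get_answer_by get_answer_by_alt
  have hfun : (fun (answer : List Int) (id : Int) =>
      match (PySem.Dict.mk d).get? id with
      | none => answer ++ [0]
      | some target =>
          answer ++ [comps.foldl (fun cnt c => if c ∈ target then cnt + 1 else cnt) (0 : Int)])
      = fun (answer : List Int) (id : Int) => answer ++
          [match (PySem.Dict.mk d).get? id with
           | none => (0 : Int)
           | some target => comps.foldl (fun cnt c => if c ∈ target then cnt + 1 else cnt) 0] := by
    funext answer id
    cases h : (PySem.Dict.mk d).get? id <;> simp
  rw [hfun, PySem.List.foldl_append_singleton_eq_map, List.nil_append]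
  exact List.map_congr_left (fun id _ => by
    cases h : (PySem.Dict.mk d).get? id
    · simp
    · simpa using inner_eq _ comps)
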